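-- pv_equiv track=rewrite | github.com/nhjydywd/compiling-lab-CQU | lab1.py | devide_word
-- ===== SOURCE A (Python) =====
-- def devide_word(word,symbol):
--     ls = word.split(symbol)
--     tail = ""
--     for i in range(1,len(ls)):
--         tail += ls[i]
--         if i < len(ls) - 1:
--             tail += symbol
--     return [ls[0],tail]
-- ===== SOURCE B (Python) =====
-- def devide_word(word, symbol):
--     head, _, tail = word.partition(symbol)
--     return [head, tail]
-- ===== Notes on version B (the rewrite author's own statement) =====
-- stated objective: idiomatic
-- what changed: Replaces split-into-all-segments plus an index loop that re-joins the tail with a single first-occurrence str.partition.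
import Mathlib
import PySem

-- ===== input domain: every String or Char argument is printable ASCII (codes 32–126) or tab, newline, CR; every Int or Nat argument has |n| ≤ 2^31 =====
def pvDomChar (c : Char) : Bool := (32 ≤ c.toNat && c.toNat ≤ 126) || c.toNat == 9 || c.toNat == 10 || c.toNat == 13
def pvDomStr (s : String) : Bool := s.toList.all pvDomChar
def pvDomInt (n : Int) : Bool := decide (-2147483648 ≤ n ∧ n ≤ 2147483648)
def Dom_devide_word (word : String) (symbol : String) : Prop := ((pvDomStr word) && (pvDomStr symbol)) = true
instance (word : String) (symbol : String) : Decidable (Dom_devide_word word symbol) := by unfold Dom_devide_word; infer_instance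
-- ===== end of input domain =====

-- B replaces A's split-all-segments + index loop re-joining the tail with a single
-- first-occurrence str.partition (more idiomatic; same values on every symbol ≠ "").


-- ===== PORT A =====
-- ls = word.split(symbol); tail = loop over range(1, len(ls)); return [ls[0], tail]
def devide_word (word : String) (symbol : String) : List String :=
  match PySem.Str.split? word symbol with
  | none => []   -- symbol = "": Python raises ValueError; excluded by Pre_
  | some ls =>
    let tail := (PySem.List.pyRange 1 ls.length).foldl
      (fun tail i =>
        let tail := tail ++ (PySem.List.pyGet? ls i).getD ""
        if i < (ls.length : Int) - 1 then tail ++ symbol else tail) ""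
    [(PySem.List.pyGet? ls 0).getD "", tail]

-- ===== PORT B =====
-- word.partition(symbol) ported exactly for symbol ≠ "" (Pre_): first occurrence via
-- str.find, then the two slices around it; symbol absent gives (word, "", "").
def devide_word_alt (word : String) (symbol : String) : List String :=
  let i := PySem.Str.find word symbol
  if i < 0 then [word, ""]
  else [PySem.Str.slice word none (some i),
        PySem.Str.slice word (some (i + PySem.Str.len symbol)) none]

-- ===== PRECONDITION & SPEC =====
-- Pre_ excludes exactly symbol = "", where A's str.split raises ValueError (B's partition raises too).
def Pre_devide_word (_word : String) (symbol : String) : Prop := symbol ≠ ""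
instance (word : String) (symbol : String) : Decidable (Pre_devide_word word symbol) := by unfold Pre_devide_word; infer_instance
def pvWitness_devide_word : String × String := ("a,b,c", ",")

def Spec_devide_word (word : String) (symbol : String) (out : List String) : Prop := out = devide_word_alt word symbol
instance (word : String) (symbol : String) (out : List String) : Decidable (Spec_devide_word word symbol out) := by unfold Spec_devide_word; infer_instance

-- ===== CLAIM (what is proved, stated in full; the proofs are below) =====
def Claim_equal_devide_word : Prop := ∀ (word : String) (symbol : String), Dom_devide_word word symbol → Pre_devide_word word symbol → Spec_devide_word word symbol (devide_word word symbol)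

-- ===== LEMMAS AND PROOFS =====

-- the accumulator of splitOn.go is prepended (reversed)
theorem pv_go_acc (sep : List Char) : ∀ (fuel : ℕ) (l cur : List Char) (acc : List (List Char)),
    PySem.Chars.splitOn.go sep fuel l cur acc = acc.reverse ++ PySem.Chars.splitOn.go sep fuel l cur [] := by
  intro fuel
  induction fuel with
  | zero => intro l cur acc; rw [PySem.Chars.splitOn.go, PySem.Chars.splitOn.go]; simp
  | succ fuel ih =>
    intro l cur acc
    cases l with
    | nil =>
      rw [PySem.Chars.splitOn.go, PySem.Chars.splitOn.go]
      · simp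
      all_goals omega
    | cons c rest =>
      rw [PySem.Chars.splitOn.go]
      conv_rhs => rw [PySem.Chars.splitOn.go]
      by_cases h : sep.isPrefixOf (c :: rest)
      · simp only [h, if_true]
        rw [ih _ _ (cur.reverse :: acc), ih _ _ ([cur.reverse])]
        simp
      · simp only [h]
        exact ih _ _ acc

-- fuel irrelevance once fuel exceeds the input length
theorem pv_go_fuel (sep : List Char) (hsep : sep ≠ []) :
    ∀ (fuel fuel' : ℕ) (l cur : List Char), l.length < fuel → l.length < fuel' →
    PySem.Chars.splitOn.go sep fuel l cur [] = PySem.Chars.splitOn.go sep fuel' l cur [] := by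
  intro fuel
  induction fuel with
  | zero => intro fuel' l cur h h'; omega
  | succ fuel ih =>
    intro fuel' l cur h h'
    cases fuel' with
    | zero => omega
    | succ fuel' =>
      cases l with
      | nil =>
        rw [PySem.Chars.splitOn.go, PySem.Chars.splitOn.go]
        all_goals omega
      | cons c rest =>
        have hlen : 1 ≤ sep.length := List.length_pos_iff.mpr hsep
        have hl : rest.length + 1 < fuel + 1 := by simpa using h
        have hl' : rest.length + 1 < fuel' + 1 := by simpa using h'
        have hd : (List.drop sep.length (c :: rest)).length = rest.length + 1 - sep.length := by
          simp
        rw [PySem.Chars.splitOn.go]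
        conv_rhs => rw [PySem.Chars.splitOn.go]
        by_cases hp : sep.isPrefixOf (c :: rest)
        · simp only [hp, if_true]
          rw [pv_go_acc sep fuel, pv_go_acc sep fuel']
          rw [ih fuel' _ _ (by omega) (by omega)]
        · simp only [hp]
          exact ih fuel' rest (c :: cur) (by omega) (by omega)

-- no occurrence: one segment
theorem pv_go_not_infix (sep : List Char) (_hsep : sep ≠ []) :
    ∀ (fuel : ℕ) (l cur : List Char), l.length < fuel → ¬ sep <:+: l →
    PySem.Chars.splitOn.go sep fuel l cur [] = [cur.reverse ++ l] := by
  intro fuel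
  induction fuel with
  | zero => intro l cur h; omega
  | succ fuel ih =>
    intro l cur h hinf
    cases l with
    | nil =>
      rw [PySem.Chars.splitOn.go]
      · simp
      all_goals omega
    | cons c rest =>
      have hp : sep.isPrefixOf (c :: rest) = false := by
        by_contra hc
        simp only [Bool.not_eq_false, List.isPrefixOf_iff_prefix] at hc
        exact hinf hc.isInfix
      rw [PySem.Chars.splitOn.go]
      simp only [hp, Bool.false_eq_true, if_false]
      rw [ih rest (c :: cur) (by simp at h ⊢; omega)
        (fun hr => hinf (hr.trans (List.suffix_cons c rest).isInfix))]
      simp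

-- first occurrence at k: first segment is take k, the rest restarts after the separator
theorem pv_go_first (sep : List Char) (hsep : sep ≠ []) :
    ∀ (fuel k : ℕ) (l cur : List Char), l.length < fuel → sep <+: l.drop k →
    (∀ i < k, ¬ sep <+: l.drop i) →
    PySem.Chars.splitOn.go sep fuel l cur [] =
      (cur.reverse ++ l.take k) :: PySem.Chars.splitOn (l.drop (k + sep.length)) sep := by
  intro fuel
  induction fuel with
  | zero => intro k l cur h; omega
  | succ fuel ih =>
    intro k l cur h hk hmin
    cases l with
    | nil =>
      exfalso
      simp only [List.drop_nil] at hk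
      exact hsep (List.prefix_nil.mp hk)
    | cons c rest =>
      have hlen : 1 ≤ sep.length := List.length_pos_iff.mpr hsep
      have hl : rest.length + 1 < fuel + 1 := by simpa using h
      have hd : (List.drop sep.length (c :: rest)).length = rest.length + 1 - sep.length := by
        simp
      rw [PySem.Chars.splitOn.go]
      cases k with
      | zero =>
        simp only [List.drop_zero] at hk
        have hp : sep.isPrefixOf (c :: rest) = true := List.isPrefixOf_iff_prefix.mpr hk
        simp only [hp, if_true]
        rw [pv_go_acc]
        rw [pv_go_fuel sep hsep fuel ((List.drop sep.length (c :: rest)).length + 1) _ []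
          (by omega) (by omega)]
        simp [PySem.Chars.splitOn]
      | succ k =>
        have hp : sep.isPrefixOf (c :: rest) = false := by
          by_contra hc
          simp only [Bool.not_eq_false, List.isPrefixOf_iff_prefix] at hc
          exact hmin 0 (Nat.succ_pos k) (by simpa using hc)
        simp only [hp, Bool.false_eq_true, if_false]
        rw [ih k rest (c :: cur) (by omega) (by simpa using hk)
          (fun i hi => by simpa using hmin (i + 1) (by omega))]
        · have h3 : k + 1 + sep.length = (k + sep.length) + 1 := by omega
          rw [h3, List.drop_succ_cons, List.take_succ_cons]
          simp

theorem pv_splitOn_not_infix (s sep : List Char) (hsep : sep ≠ []) (h : ¬ sep <:+: s) :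
    PySem.Chars.splitOn s sep = [s] := by
  rw [PySem.Chars.splitOn, pv_go_not_infix sep hsep _ s [] (by omega) h]; simp

theorem pv_splitOn_first (s sep : List Char) (hsep : sep ≠ []) (k : ℕ)
    (hk : sep <+: s.drop k) (hmin : ∀ i < k, ¬ sep <+: s.drop i) :
    PySem.Chars.splitOn s sep = s.take k :: PySem.Chars.splitOn (s.drop (k + sep.length)) sep := by
  rw [PySem.Chars.splitOn, pv_go_first sep hsep _ k s [] (by omega) hk hmin]; simp

theorem pv_splitOn_ne_nil (s sep : List Char) (hsep : sep ≠ []) :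
    PySem.Chars.splitOn s sep ≠ [] := by
  by_cases h : sep <:+: s
  · have hf : 0 ≤ PySem.Chars.find s sep := (PySem.Chars.find_nonneg_iff s sep).mpr h
    obtain ⟨h1, h2⟩ := PySem.Chars.find_spec hf
    rw [pv_splitOn_first s sep hsep _ h1 h2]; simp
  · rw [pv_splitOn_not_infix s sep hsep h]; simp

-- join of segments with the separator between (the value A's loop computes on the tail)
def pvChJoin (sep : List Char) : List (List Char) → List Char
  | [] => []
  | [x] => x
  | x :: y :: ys => x ++ sep ++ pvChJoin sep (y :: ys)

theorem pv_chJoin_cons (sep x : List Char) (l : List (List Char)) (h : l ≠ []) :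
    pvChJoin sep (x :: l) = x ++ sep ++ pvChJoin sep l := by
  cases l with
  | nil => exact absurd rfl h
  | cons y ys => rfl

-- split/join roundtrip
theorem pv_chJoin_splitOn (sep : List Char) (hsep : sep ≠ []) :
    ∀ (n : ℕ) (s : List Char), s.length ≤ n → pvChJoin sep (PySem.Chars.splitOn s sep) = s := by
  intro n
  induction n with
  | zero =>
    intro s hs
    have : s = [] := List.eq_nil_of_length_eq_zero (by omega)
    subst this
    rw [pv_splitOn_not_infix [] sep hsep (by
      intro h
      exact hsep (List.eq_nil_of_infix_nil h))]
    rfl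
  | succ n ih =>
    intro s hs
    by_cases h : sep <:+: s
    · have hf : 0 ≤ PySem.Chars.find s sep := (PySem.Chars.find_nonneg_iff s sep).mpr h
      obtain ⟨h1, h2⟩ := PySem.Chars.find_spec hf
      set k := (PySem.Chars.find s sep).toNat with hkdef
      rw [pv_splitOn_first s sep hsep k h1 h2]
      obtain ⟨t, ht⟩ := h1
      have hklen : k ≤ s.length := by
        have := PySem.Chars.find_le_length s sep
        omega
      have hdl : (s.drop k).length = sep.length + t.length := by rw [← ht]; simp
      have hdrop : s.drop (k + sep.length) = t := by
        have : s.drop (k + sep.length) = (s.drop k).drop sep.length := by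
          rw [List.drop_drop]
        rw [this, ← ht, List.drop_left]
      have hsep1 : 1 ≤ sep.length := List.length_pos_iff.mpr hsep
      rw [pv_chJoin_cons sep _ _ (pv_splitOn_ne_nil _ sep hsep), hdrop,
        ih t (by simp at hdl ⊢; omega)]
      calc s.take k ++ sep ++ t = s.take k ++ (sep ++ t) := by rw [List.append_assoc]
        _ = s.take k ++ s.drop k := by rw [ht]
        _ = s := List.take_append_drop k s
    · rw [pv_splitOn_not_infix s sep hsep h]; rfl

-- the String-level join A's loop computes over ls[1:]
def pvStrJoinTail (sep : String) : List String → String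
  | [] => ""
  | [x] => x
  | x :: y :: ys => x ++ sep ++ pvStrJoinTail sep (y :: ys)

theorem pv_strJoinTail_toList (sep : String) : ∀ (l : List String),
    (pvStrJoinTail sep l).toList = pvChJoin sep.toList (l.map String.toList) := by
  intro l
  induction l with
  | nil => rfl
  | cons x ys ih =>
    cases ys with
    | nil => rfl
    | cons y ys' =>
      show (x ++ sep ++ pvStrJoinTail sep (y :: ys')).toList = _
      simp only [List.map_cons]
      rw [pv_chJoin_cons sep.toList x.toList _ (by simp)]
      simp [ih]

-- A's tail loop equals pvStrJoinTail of ls[1:]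
theorem pv_loop_eq (ls : List String) (sep : String) :
    ∀ (d a : ℕ) (t : String), a + d = ls.length → 1 ≤ a →
    (PySem.List.pyRange (a : ℤ) (ls.length : ℤ)).foldl
      (fun tail i =>
        if i < (ls.length : Int) - 1 then tail ++ (PySem.List.pyGet? ls i).getD "" ++ sep
        else tail ++ (PySem.List.pyGet? ls i).getD "") t
      = t ++ pvStrJoinTail sep (ls.drop a) := by
  intro d
  induction d with
  | zero =>
    intro a t ha h1
    have : (PySem.List.pyRange (a : ℤ) (ls.length : ℤ)) = [] := by
      have : (a : ℤ) = (ls.length : ℤ) := by omega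
      rw [this]; simp [PySem.List.pyRange]
    rw [this, List.foldl_nil, List.drop_of_length_le (by omega)]
    show t = t ++ ""
    simp
  | succ d ih =>
    intro a t ha h1
    have hlt : (a : ℤ) < (ls.length : ℤ) := by omega
    rw [PySem.List.pyRange_one_cons hlt, List.foldl_cons]
    have hget : PySem.List.pyGet? ls (a : ℤ) = some (ls[a]'(by omega)) := by
      rw [PySem.List.pyGet?_natCast]
      exact List.getElem?_eq_getElem (by omega)
    have hdropa : ls.drop a = ls[a]'(by omega) :: ls.drop (a + 1) :=
      List.drop_eq_getElem_cons (by omega)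
    by_cases hc : (a : ℤ) < (ls.length : ℤ) - 1
    · simp only [hget, Option.getD_some, hc, if_true]
      have ih' := ih (a + 1) (t ++ ls[a]'(by omega) ++ sep) (by omega) (by omega)
      push_cast at ih'
      rw [ih']
      have hne : ls.drop (a + 1) ≠ [] := by
        have : (ls.drop (a + 1)).length = ls.length - (a + 1) := by simp
        intro hnil
        rw [hnil] at this
        simp at this
        omega
      rw [hdropa]
      cases hd : ls.drop (a + 1) with
      | nil => exact absurd hd hne
      | cons y ys =>
        show _ = t ++ (ls[a]'(by omega) ++ sep ++ pvStrJoinTail sep (y :: ys))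
        rw [← hd]
        simp [String.append_assoc]
    · have haeq : a = ls.length - 1 := by omega
      simp only [hget, Option.getD_some, hc, if_false]
      have hd0 : d = 0 := by omega
      subst hd0
      have hnil : (PySem.List.pyRange ((a : ℤ) + 1) (ls.length : ℤ)) = [] := by
        have : (a : ℤ) + 1 = (ls.length : ℤ) := by omega
        rw [this]; simp [PySem.List.pyRange]
      rw [hnil, List.foldl_nil, hdropa, List.drop_of_length_le (by omega)]
      rfl

-- ===== VERDICT (by name: the statement is the Claim_ definition above) =====
theorem devide_word_spec : Claim_equal_devide_word := by
  intro word symbol _ hpre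
  unfold Spec_devide_word devide_word devide_word_alt
  have hp : symbol.toList ≠ [] := by simpa using hpre
  have hsplit : PySem.Str.split? word symbol =
      some ((PySem.Chars.splitOn word.toList symbol.toList).map String.ofList) := by
    rw [PySem.Str.split?, PySem.Chars.split?]
    simp [List.isEmpty_iff, hp]
  rw [hsplit]
  simp only
  by_cases h : symbol.toList <:+: word.toList
  · -- symbol occurs: find ≥ 0, A splits at the first occurrence
    have hf : 0 ≤ PySem.Chars.find word.toList symbol.toList :=
      (PySem.Chars.find_nonneg_iff _ _).mpr h
    obtain ⟨h1, h2⟩ := PySem.Chars.find_spec hf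
    set k := (PySem.Chars.find word.toList symbol.toList).toNat with hkdef
    have hsplitOn := pv_splitOn_first word.toList symbol.toList hp k h1 h2
    have hfind : PySem.Str.find word symbol = (k : ℤ) := by
      rw [PySem.Str.find]; omega
    have hnlt : ¬ PySem.Str.find word symbol < 0 := by omega
    rw [if_neg hnlt]
    set r := word.toList.drop (k + symbol.toList.length) with hrdef
    set ms := (PySem.Chars.splitOn word.toList symbol.toList).map String.ofList with hmsdef
    have hms : ms = String.ofList (word.toList.take k) ::
        (PySem.Chars.splitOn r symbol.toList).map String.ofList := by
      rw [hmsdef, hsplitOn]; rfl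
    have hlen1 : 1 ≤ ms.length := by rw [hms]; simp
    -- head
    have hhead : (PySem.List.pyGet? ms 0).getD "" = String.ofList (word.toList.take k) := by
      have : PySem.List.pyGet? ms (0 : ℕ) = ms[0]? := PySem.List.pyGet?_natCast ms 0
      rw [hms]; simp
    -- tail via the loop lemma and the roundtrip
    have htail := pv_loop_eq ms symbol (ms.length - 1) 1 "" (by omega) (by omega)
    simp only [Nat.cast_one] at htail
    have htail2 : pvStrJoinTail symbol (ms.drop 1) = String.ofList r := by
      apply String.toList_injective
      rw [pv_strJoinTail_toList]
      have : (ms.drop 1).map String.toList = PySem.Chars.splitOn r symbol.toList := by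
        rw [hms]
        simp [List.map_map, Function.comp_def]
      rw [this, pv_chJoin_splitOn symbol.toList hp r.length r (le_refl _)]
      simp
    rw [htail, htail2]
    -- B's two slices
    have hslice1 : PySem.Str.slice word none (some (PySem.Str.find word symbol)) =
        String.ofList (word.toList.take k) := by
      rw [PySem.Str.slice, hfind]
      rw [PySem.Chars.slice_eq_listSlice, PySem.List.slice_to _ (by omega)]
      simp
    have hslice2 : PySem.Str.slice word (some (PySem.Str.find word symbol + PySem.Str.len symbol)) none =
        String.ofList r := by
      rw [PySem.Str.slice, hfind, PySem.Str.len]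
      rw [PySem.Chars.slice_eq_listSlice, PySem.List.slice_from _ (by omega)]
      have hnat : ((k : ℤ) + (symbol.toList.length : ℤ)).toNat = k + symbol.toList.length := by
        omega
      rw [hnat, hrdef]
    rw [hslice1, hslice2, hhead]
    simp
  · -- symbol absent: ls = [word], tail = "", B returns [word, ""]
    have hfneg : PySem.Chars.find word.toList symbol.toList = -1 :=
      (PySem.Chars.find_eq_neg_one_iff _ _).mpr h
    have hlt : PySem.Str.find word symbol < 0 := by rw [PySem.Str.find, hfneg]; omega
    rw [if_pos hlt]
    rw [pv_splitOn_not_infix word.toList symbol.toList hp h]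
    simp [PySem.List.pyRange]
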